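-- pv_equiv track=rewrite | github.com/Halliom/AdventOfCodeSolutions | 3/main.py | calcHouses
-- ===== SOURCE A (Python) =====
-- def calcHouses(map):
--     # Current house position
--     currHouse = (0, 0)
--     # A set of all the houses we've visited
--     visited = set()
--     # Start by delivering a present to the current house
--     visited.add(currHouse)
--     for c in map:
--         if c == '^':
--             currHouse = (currHouse[0], currHouse[1] + 1)
--         elif c == 'v':
--             currHouse = (currHouse[0], currHouse[1] - 1)
--         elif c == '>':
--             currHouse = (currHouse[0] + 1, currHouse[1])
--         elif c == '<':
--             currHouse = (currHouse[0] - 1, currHouse[1])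
--         visited.add(currHouse)
--     return visited
-- ===== SOURCE B (Python) =====
-- def calcHouses(map):
--     # Divide and conquer: the houses visited on a walk l+r are the houses of l
--     # united with the houses of r translated by l's net displacement.
--     DELTA = {'^': (0, 1), 'v': (0, -1), '>': (1, 0), '<': (-1, 0)}
--
--     def solve(s):
--         # returns (visited houses starting from (0,0), net displacement of s)
--         if len(s) <= 1:
--             d = DELTA.get(s, (0, 0))
--             return ({(0, 0), d}, d)
--         k = len(s) // 2
--         lv, ld = solve(s[:k])
--         rv, rd = solve(s[k:])
--         shifted = {(ld[0] + x, ld[1] + y) for (x, y) in rv}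
--         return (lv | shifted, (ld[0] + rd[0], ld[1] + rd[1]))
--
--     return solve(map)[0]
-- ===== Notes on version B (the rewrite author's own statement) =====
-- stated objective: alternative
-- what changed: B replaces A's single left-to-right loop (position + visited set updated per character) by a divide-and-conquer recursion: it splits the move string in half, solves each half independently from the origin, translates the right half's house set by the left half's net displacement, and unions the two sets.
import Mathlib
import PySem

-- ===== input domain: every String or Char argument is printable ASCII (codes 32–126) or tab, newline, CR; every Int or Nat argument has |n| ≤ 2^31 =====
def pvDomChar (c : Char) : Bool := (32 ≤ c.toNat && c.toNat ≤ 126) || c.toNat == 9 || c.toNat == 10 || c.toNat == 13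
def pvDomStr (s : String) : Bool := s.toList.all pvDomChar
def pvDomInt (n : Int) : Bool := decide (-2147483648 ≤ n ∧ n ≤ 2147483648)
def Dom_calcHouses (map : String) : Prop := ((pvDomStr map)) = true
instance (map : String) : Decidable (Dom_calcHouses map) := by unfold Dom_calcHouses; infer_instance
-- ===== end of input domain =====

-- ===== PORT A =====
-- B replaces A's single left-to-right loop by a divide-and-conquer walk (translate the
-- right half's houses by the left half's net displacement); return values proved equal.
-- step of A's loop body: the if/elif chain updating currHouse
def pvStepA (c : Char) (p : Int × Int) : Int × Int :=
  if c = '^' then (p.1, p.2 + 1)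
  else if c = 'v' then (p.1, p.2 - 1)
  else if c = '>' then (p.1 + 1, p.2)
  else if c = '<' then (p.1 - 1, p.2)
  else p

def calcHouses (map : String) : List (Int × Int) :=
  (map.toList.foldl
    (fun (st : (Int × Int) × PySem.Set (Int × Int)) c =>
      let p := pvStepA c st.1
      (p, PySem.Set.add st.2 p))
    ((0, 0), PySem.Set.add PySem.Set.empty (0, 0))).2

-- ===== PORT B =====
-- Source B's DELTA.get(s, (0, 0)); in Source B the key is the (≤1-char) string s itself,
-- here the single char (exact: a 1-char string lookup hits iff its char matches).
def pvDeltaB (c : Char) : Int × Int :=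
  PySem.Dict.getD (PySem.Dict.ofList [('^', ((0 : Int), (1 : Int))), ('v', (0, -1)), ('>', (1, 0)), ('<', (-1, 0))]) c (0, 0)

-- Source B's solve: divide and conquer, returns (visited set, net displacement)
-- DELTA.get on the (≤1-char) base string: empty -> default (0,0), one char -> its delta
def pvBaseDelta (cs : List Char) : Int × Int :=
  match cs with
  | [] => ((0 : Int), (0 : Int))
  | c :: _ => pvDeltaB c

def pvSolve (cs : List Char) : PySem.Set (Int × Int) × (Int × Int) :=
  if _h : cs.length ≤ 1 then
    let d := pvBaseDelta cs
    (PySem.Set.add (PySem.Set.add PySem.Set.empty (0, 0)) d, d)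
  else
    let k := cs.length / 2
    let l := pvSolve (cs.take k)
    let r := pvSolve (cs.drop k)
    let shifted := PySem.Set.ofList (r.1.map (fun p => (l.2.1 + p.1, l.2.2 + p.2)))
    (PySem.Set.union l.1 shifted, (l.2.1 + r.2.1, l.2.2 + r.2.2))
termination_by cs.length
decreasing_by
  · simp only [List.length_take]; omega
  · simp only [List.length_drop]; omega

def calcHouses_alt (map : String) : List (Int × Int) :=
  (pvSolve map.toList).1

-- ===== PRECONDITION & SPEC =====
def Spec_calcHouses (map : String) (out : List (Int × Int)) : Prop := out = calcHouses_alt map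
instance (map : String) (out : List (Int × Int)) : Decidable (Spec_calcHouses map out) := by unfold Spec_calcHouses; infer_instance

-- ===== CLAIM (what is proved, stated in full; the proofs are below) =====
def Claim_equal_calcHouses : Prop := ∀ (map : String), Dom_calcHouses map → Spec_calcHouses map (calcHouses map)

-- ===== LEMMAS AND PROOFS =====
-- trajectory of positions visited after each step, starting from p
def pvTraj (p : Int × Int) : List Char → List (Int × Int)
  | [] => []
  | c :: cs => let q := pvStepA c p; q :: pvTraj q cs

-- final position after walking cs from p
def pvEnd (p : Int × Int) (cs : List Char) : Int × Int :=
  cs.foldl (fun q c => pvStepA c q) p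

theorem pvStepA_eq_delta (c : Char) (p : Int × Int) :
    pvStepA c p = (p.1 + (pvDeltaB c).1, p.2 + (pvDeltaB c).2) := by
  have hd : pvDeltaB c = (if c = '^' then ((0 : Int), (1 : Int)) else if c = 'v' then (0, -1)
      else if c = '>' then (1, 0) else if c = '<' then (-1, 0) else (0, 0)) := by
    unfold pvDeltaB
    have hmk : (PySem.Dict.ofList [('^', ((0 : Int), (1 : Int))), ('v', (0, -1)), ('>', (1, 0)), ('<', (-1, 0))])
        = PySem.Dict.mk [('^', ((0 : Int), (1 : Int))), ('v', (0, -1)), ('>', (1, 0)), ('<', (-1, 0))] := by decide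
    rw [hmk]
    by_cases h1 : c = '^'
    · subst h1; decide
    by_cases h2 : c = 'v'
    · subst h2; decide
    by_cases h3 : c = '>'
    · subst h3; decide
    by_cases h4 : c = '<'
    · subst h4; decide
    have b1 : ('^' == c) = false := by simp [Ne.symm h1]
    have b2 : ('v' == c) = false := by simp [Ne.symm h2]
    have b3 : ('>' == c) = false := by simp [Ne.symm h3]
    have b4 : ('<' == c) = false := by simp [Ne.symm h4]
    simp [PySem.Dict.getD, PySem.Dict.get?, b1, b2, b3, b4, h1, h2, h3, h4]
  rw [hd]; unfold pvStepA
  split_ifs <;> simp_all <;> omega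

-- A's fold: the final visited set is the initial set updated with the trajectory
theorem pvFoldA_snd (cs : List Char) (p : Int × Int) (s : PySem.Set (Int × Int)) :
    (cs.foldl
      (fun (st : (Int × Int) × PySem.Set (Int × Int)) c =>
        let q := pvStepA c st.1
        (q, PySem.Set.add st.2 q)) (p, s)).2
      = (pvTraj p cs).foldl PySem.Set.add s := by
  induction cs generalizing p s with
  | nil => rfl
  | cons c cs ih => simp [pvTraj, List.foldl, ih]

-- the walk is translation-equivariant
theorem pvTraj_shift (cs : List Char) (v p : Int × Int) :
    pvTraj (v.1 + p.1, v.2 + p.2) cs = (pvTraj p cs).map (fun q => (v.1 + q.1, v.2 + q.2)) := by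
  induction cs generalizing p with
  | nil => rfl
  | cons c cs ih =>
      simp only [pvTraj, List.map]
      rw [pvStepA_eq_delta c (v.1 + p.1, v.2 + p.2), pvStepA_eq_delta c p]
      simp only [List.cons.injEq, Prod.mk.injEq]
      refine ⟨⟨by ring, by ring⟩, ?_⟩
      have := ih (p.1 + (pvDeltaB c).1, p.2 + (pvDeltaB c).2)
      simp only at this
      rw [← this]
      congr 1
      simp only [Prod.mk.injEq]
      constructor <;> ring

theorem pvEnd_shift (cs : List Char) (v p : Int × Int) :
    pvEnd (v.1 + p.1, v.2 + p.2) cs = (v.1 + (pvEnd p cs).1, v.2 + (pvEnd p cs).2) := by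
  induction cs generalizing p with
  | nil => rfl
  | cons c cs ih =>
      simp only [pvEnd, List.foldl]
      rw [pvStepA_eq_delta c (v.1 + p.1, v.2 + p.2), pvStepA_eq_delta c p]
      have := ih (p.1 + (pvDeltaB c).1, p.2 + (pvDeltaB c).2)
      simp only [pvEnd] at this ⊢
      rw [← this]
      congr 2 <;> ring

theorem pvTraj_append (l r : List Char) (p : Int × Int) :
    pvTraj p (l ++ r) = pvTraj p l ++ pvTraj (pvEnd p l) r := by
  induction l generalizing p with
  | nil => rfl
  | cons c cs ih => simp [pvTraj, pvEnd, List.foldl, ih, pvEnd]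

theorem pvEnd_mem (cs : List Char) (p : Int × Int) : pvEnd p cs ∈ p :: pvTraj p cs := by
  induction cs generalizing p with
  | nil => simp [pvEnd]
  | cons c cs ih =>
      simp only [pvTraj, pvEnd, List.foldl]
      have := ih (pvStepA c p)
      simp only [pvEnd] at this
      rcases List.mem_cons.mp this with h | h
      · simp [h]
      · simp [h]

-- s.update(set(xs)) = s.update(xs)
theorem pvUpdate_ofList {α : Type} [BEq α] [LawfulBEq α] (s : PySem.Set α) (xs : List α) :
    PySem.Set.update s (PySem.Set.ofList xs) = PySem.Set.update s xs := by
  induction xs using List.reverseRecOn with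
  | nil => rfl
  | append_singleton xs x ih =>
      rw [PySem.Set.ofList_append_singleton, PySem.Set.update_append,
          PySem.Set.update_cons, PySem.Set.update_nil]
      by_cases hx : x ∈ PySem.Set.ofList xs
      · rw [PySem.Set.add_of_mem hx, ih]
        have hx2 : x ∈ PySem.Set.update s xs := by
          rw [PySem.Set.mem_update]; right; exact (PySem.Set.mem_ofList xs x).mp hx
        rw [PySem.Set.add_of_mem hx2]
      · rw [PySem.Set.add_of_not_mem hx, PySem.Set.update_append, ih,
            PySem.Set.update_cons, PySem.Set.update_nil]

-- set(map f (set xs)) = set(map f xs)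
theorem pvOfList_map_ofList {α β : Type} [BEq α] [LawfulBEq α] [BEq β] [LawfulBEq β] (f : α → β) (xs : List α) :
    PySem.Set.ofList ((PySem.Set.ofList xs).map f) = PySem.Set.ofList (xs.map f) := by
  induction xs using List.reverseRecOn with
  | nil => rfl
  | append_singleton xs x ih =>
      rw [PySem.Set.ofList_append_singleton]
      simp only [List.map_append, List.map_cons, List.map_nil]
      rw [PySem.Set.ofList_append_singleton]
      by_cases hx : x ∈ PySem.Set.ofList xs
      · rw [PySem.Set.add_of_mem hx, ih]
        have hfx : f x ∈ PySem.Set.ofList (xs.map f) := by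
          rw [PySem.Set.mem_ofList] at hx ⊢
          exact List.mem_map_of_mem hx
        rw [PySem.Set.add_of_mem hfx]
      · rw [PySem.Set.add_of_not_mem hx]
        simp only [List.map_append, List.map_cons, List.map_nil]
        rw [PySem.Set.ofList_append_singleton, ih]

-- characterization of Source B's solve
theorem pvSolve_eq (cs : List Char) :
    pvSolve cs = (PySem.Set.ofList (((0 : Int), (0 : Int)) :: pvTraj (0, 0) cs), pvEnd (0, 0) cs) := by
  induction cs using pvSolve.induct with
  | case1 cs h =>
      rw [pvSolve]
      simp only [h, dite_true]
      cases cs with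
      | nil => decide
      | cons c cs' =>
          cases cs' with
          | cons d t => simp [List.length] at h
          | nil =>
              simp only [pvTraj, pvEnd, List.foldl, pvBaseDelta]
              rw [pvStepA_eq_delta]
              simp only [zero_add]
              rfl
  | case2 cs h k ihl ihr =>
      have ihl' : pvSolve (List.take (cs.length / 2) cs)
          = (PySem.Set.ofList (((0 : Int), (0 : Int)) :: pvTraj (0, 0) (List.take (cs.length / 2) cs)),
             pvEnd (0, 0) (List.take (cs.length / 2) cs)) := ihl
      have ihr' : pvSolve (List.drop (cs.length / 2) cs)
          = (PySem.Set.ofList (((0 : Int), (0 : Int)) :: pvTraj (0, 0) (List.drop (cs.length / 2) cs)),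
             pvEnd (0, 0) (List.drop (cs.length / 2) cs)) := ihr
      rw [pvSolve]
      simp only [h, dite_false]
      rw [ihl', ihr']
      have hk1 : 1 ≤ cs.length / 2 := by omega
      have hsplit : cs.take (cs.length / 2) ++ cs.drop (cs.length / 2) = cs := List.take_append_drop _ _
      set L := cs.take (cs.length / 2) with hL
      set R := cs.drop (cs.length / 2) with hR
      set p' := pvEnd (0, 0) L with hp'
      have hshift : (((0 : Int), (0 : Int)) :: pvTraj (0, 0) R).map (fun q => (p'.1 + q.1, p'.2 + q.2))
          = p' :: pvTraj p' R := by
        simp only [List.map]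
        refine List.cons_eq_cons.mpr ⟨by simp, ?_⟩
        rw [← pvTraj_shift R p' (0, 0)]
        congr 1
        all_goals simp
      simp only [Prod.mk.injEq]
      constructor
      · -- set component
        rw [pvOfList_map_ofList, hshift]
        have htraj : pvTraj (0, 0) cs = pvTraj (0, 0) L ++ pvTraj p' R := by
          conv_lhs => rw [← hsplit]
          rw [pvTraj_append]
        rw [htraj]
        have hmem : p' ∈ PySem.Set.ofList (((0 : Int), (0 : Int)) :: pvTraj (0, 0) L) := by
          rw [PySem.Set.mem_ofList]; exact pvEnd_mem L (0, 0)
        calc PySem.Set.union (PySem.Set.ofList ((0, 0) :: pvTraj (0, 0) L))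
              (PySem.Set.ofList (p' :: pvTraj p' R))
            = PySem.Set.update (PySem.Set.ofList ((0, 0) :: pvTraj (0, 0) L)) (p' :: pvTraj p' R) := by
              show PySem.Set.update _ (PySem.Set.ofList (p' :: pvTraj p' R)) = _
              rw [pvUpdate_ofList]
          _ = PySem.Set.update (PySem.Set.ofList ((0, 0) :: pvTraj (0, 0) L)) (pvTraj p' R) := by
              rw [PySem.Set.update_cons, PySem.Set.add_of_mem hmem]
          _ = PySem.Set.ofList (((0, 0) :: pvTraj (0, 0) L) ++ pvTraj p' R) := by
              rw [PySem.Set.ofList_append]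
          _ = PySem.Set.ofList ((0, 0) :: (pvTraj (0, 0) L ++ pvTraj p' R)) := by simp
      · -- displacement component
        have hEapp : pvEnd (0, 0) cs = pvEnd p' R := by
          conv_lhs => rw [← hsplit]
          exact List.foldl_append ..
        rw [hEapp]
        have := pvEnd_shift R p' (0, 0)
        simp only [add_zero] at this
        rw [show p' = (p'.1 + (0 : Int), p'.2 + (0 : Int)) from by simp] at this
        simp only [add_zero] at this
        rw [this]

-- ===== VERDICT (by name: the statement is the Claim_ definition above) =====
theorem calcHouses_spec : Claim_equal_calcHouses := by
  intro map _
  unfold Spec_calcHouses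
  simp only [calcHouses, calcHouses_alt]
  rw [pvFoldA_snd, pvSolve_eq]
  have h0 : PySem.Set.add PySem.Set.empty ((0 : Int), (0 : Int)) = PySem.Set.ofList [((0 : Int), (0 : Int))] := by decide
  rw [h0]
  rw [show PySem.Set.ofList (((0 : Int), (0 : Int)) :: pvTraj (0, 0) map.toList)
      = PySem.Set.update (PySem.Set.ofList [((0 : Int), (0 : Int))]) (pvTraj (0, 0) map.toList) from by
    rw [← PySem.Set.ofList_append]; simp]
  rfl
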